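-- pv_equiv track=rewrite | github.com/quoth-le-corbeau/advent_of_code | advent_2025/day_3/solutions.py | _find_largest_two_digit_voltage
-- ===== SOURCE A (Python) =====
-- def _find_largest_two_digit_voltage(bank: list[int]) -> int:
--     max_t = len(bank) - 1
--     max_u = len(bank)
--     tens = 0
--     tens_i = 0
--     units = 0
--     for t in range(max_t):
--         if bank[t] > tens:
--             tens = bank[t]
--             tens_i = t
--     for u in range(max_u):
--         if bank[u] > units and u > tens_i:
--             units = bank[u]
--     return tens * 10 + units
-- ===== SOURCE B (Python) =====
-- def _find_largest_two_digit_voltage(bank: list[int]) -> int: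
--     # Single forward pass: maintain the greedy tens pick (earliest strict max
--     # among all but the last element) and the running units max over the
--     # suffix after the current tens index, resetting units when tens moves.
--     tens = 0
--     tens_i = 0
--     units = 0
--     last = len(bank) - 1
--     for k, v in enumerate(bank):
--         if k < last and v > tens:
--             tens = v
--             tens_i = k
--             units = 0
--         elif k > tens_i and v > units:
--             units = v
--     return tens * 10 + units
-- ===== Notes on version B (the rewrite author's own statement) =====
-- stated objective: alternative
-- what changed: A's two sequential index loops (pick tens over bank[:-1], then rescan the whole list for units past tens_i) are fused into one forward enumerate pass that maintains tens, tens_i and units together, resetting units whenever a new tens index is taken.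
import Mathlib
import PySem

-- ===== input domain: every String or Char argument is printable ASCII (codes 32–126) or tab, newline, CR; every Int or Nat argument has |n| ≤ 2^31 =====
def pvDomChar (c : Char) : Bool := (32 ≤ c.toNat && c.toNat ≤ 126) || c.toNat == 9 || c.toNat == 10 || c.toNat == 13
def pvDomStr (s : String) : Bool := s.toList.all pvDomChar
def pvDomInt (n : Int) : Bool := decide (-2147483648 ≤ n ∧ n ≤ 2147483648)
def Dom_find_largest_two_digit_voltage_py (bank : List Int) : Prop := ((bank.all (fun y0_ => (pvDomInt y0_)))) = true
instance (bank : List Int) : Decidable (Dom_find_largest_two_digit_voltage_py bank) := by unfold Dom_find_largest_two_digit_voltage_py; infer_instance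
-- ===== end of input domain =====

-- B fuses A's two sequential index loops into one forward enumerate pass
-- (alternative decomposition, same O(n) cost); return values proved equal on all inputs.

-- ===== PORT A =====
-- indices drawn from range(len(bank)) / range(len(bank)-1) are always in range,
-- so the pyGetD default 0 is never consulted
def find_largest_two_digit_voltage_py (bank : List Int) : Int :=
  let max_t : Int := PySem.List.len bank - 1
  let max_u : Int := PySem.List.len bank
  let s := (PySem.List.pyRange 0 max_t 1).foldl
    (fun (st : Int × Int) t =>
      if PySem.List.pyGetD bank t 0 > st.1 then (PySem.List.pyGetD bank t 0, t) else st)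
    (0, 0)
  let units := (PySem.List.pyRange 0 max_u 1).foldl
    (fun units u =>
      if PySem.List.pyGetD bank u 0 > units ∧ u > s.2 then PySem.List.pyGetD bank u 0 else units)
    0
  s.1 * 10 + units

-- ===== PORT B =====
def find_largest_two_digit_voltage_py_alt (bank : List Int) : Int :=
  let last : Int := PySem.List.len bank - 1
  let s := (PySem.List.enumerate bank 0).foldl
    (fun (st : Int × Int × Int) kv =>
      if kv.1 < last ∧ kv.2 > st.1 then (kv.2, kv.1, 0)
      else if kv.1 > st.2.1 ∧ kv.2 > st.2.2 then (st.1, st.2.1, kv.2) else st)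
    (0, 0, 0)
  s.1 * 10 + s.2.2

-- ===== PRECONDITION & SPEC =====
def Spec_find_largest_two_digit_voltage_py (bank : List Int) (out : Int) : Prop := out = find_largest_two_digit_voltage_py_alt bank
instance (bank : List Int) (out : Int) : Decidable (Spec_find_largest_two_digit_voltage_py bank out) := by unfold Spec_find_largest_two_digit_voltage_py; infer_instance

-- ===== CLAIM (what is proved, stated in full; the proofs are below) =====
def Claim_equal_find_largest_two_digit_voltage_py : Prop := ∀ (bank : List Int), Dom_find_largest_two_digit_voltage_py bank → Spec_find_largest_two_digit_voltage_py bank (find_largest_two_digit_voltage_py bank)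

-- ===== LEMMAS AND PROOFS =====

-- A's tens step, over (index, value) pairs, guarded by index < last
def stepT (last : Int) (st : Int × Int) (kv : Int × Int) : Int × Int :=
  if kv.1 < last ∧ kv.2 > st.1 then (kv.2, kv.1) else st

-- A's units step with fixed tens index ti
def stepU (ti : Int) (u : Int) (kv : Int × Int) : Int :=
  if kv.2 > u ∧ kv.1 > ti then kv.2 else u

-- B's fused step
def stepB (last : Int) (st : Int × Int × Int) (kv : Int × Int) : Int × Int × Int :=
  if kv.1 < last ∧ kv.2 > st.1 then (kv.2, kv.1, 0)
  else if kv.1 > st.2.1 ∧ kv.2 > st.2.2 then (st.1, st.2.1, kv.2) else st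

-- the tens index produced by folding stepT is either the initial one or one of the seen indices
lemma stepT_snd (last : Int) (zs : List (Int × Int)) : ∀ (tens ti : Int),
    (zs.foldl (stepT last) (tens, ti)).2 = ti ∨
      ∃ kv ∈ zs, (zs.foldl (stepT last) (tens, ti)).2 = kv.1 := by
  induction zs with
  | nil => intro tens ti; left; rfl
  | cons kv rest ih =>
    intro tens ti
    simp only [List.foldl_cons, stepT]
    split_ifs with h
    · rcases ih kv.2 kv.1 with h1 | ⟨p, hp, he⟩
      · exact Or.inr ⟨kv, List.mem_cons_self, h1⟩
      · exact Or.inr ⟨p, List.mem_cons_of_mem _ hp, he⟩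
    · rcases ih tens ti with h1 | ⟨p, hp, he⟩
      · exact Or.inl h1
      · exact Or.inr ⟨p, List.mem_cons_of_mem _ hp, he⟩

-- main invariant: B's single fused fold equals A's two folds, provided the
-- indices are strictly increasing and all strictly above the current tens index
lemma mainB (last : Int) (zs : List (Int × Int)) : ∀ (tens ti units : Int),
    zs.Pairwise (fun a b => a.1 < b.1) →
    (∀ kv ∈ zs, ti < kv.1) →
    zs.foldl (stepB last) (tens, ti, units) =
      ((zs.foldl (stepT last) (tens, ti)).1,
       (zs.foldl (stepT last) (tens, ti)).2,
       zs.foldl (stepU (zs.foldl (stepT last) (tens, ti)).2)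
         (if (zs.foldl (stepT last) (tens, ti)).2 = ti then units else 0)) := by
  induction zs with
  | nil => intro tens ti units _ _; simp
  | cons kv rest ih =>
    intro tens ti units hpw hlb
    have hpw' := List.Pairwise.of_cons hpw
    have hkrest : ∀ p ∈ rest, kv.1 < p.1 := (List.pairwise_cons.mp hpw).1
    have hk : ti < kv.1 := hlb kv List.mem_cons_self
    simp only [List.foldl_cons]
    by_cases h : kv.1 < last ∧ kv.2 > tens
    · -- tens is updated at kv; units restarts at 0
      have hT : stepT last (tens, ti) kv = (kv.2, kv.1) := by simp [stepT, h]
      have hB : stepB last (tens, ti, units) kv = (kv.2, kv.1, 0) := by simp [stepB, h]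
      simp only [hT, hB]
      rw [ih kv.2 kv.1 0 hpw' hkrest]
      set q := rest.foldl (stepT last) (kv.2, kv.1) with hq
      have hq2 : kv.1 ≤ q.2 := by
        rcases stepT_snd last rest kv.2 kv.1 with h1 | ⟨p, hp, he⟩
        · rw [← hq] at h1; omega
        · rw [← hq] at he; have := hkrest p hp; omega
      have h1 : (if q.2 = kv.1 then (0 : Int) else 0) = 0 := by split_ifs <;> rfl
      have h2 : (if q.2 = ti then units else (0 : Int)) = 0 := if_neg (by omega)
      have h3 : stepU q.2 0 kv = 0 := by
        simp only [stepU]; rw [if_neg]; rintro ⟨-, hgt⟩; omega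
      simp only [h1, h2, h3]
    · -- tens unchanged at kv; B's elif condition kv.1 > ti holds here
      have hT : stepT last (tens, ti) kv = (tens, ti) := by simp [stepT, h]
      have hB : stepB last (tens, ti, units) kv =
          (tens, ti, if kv.2 > units then kv.2 else units) := by
        by_cases hv : kv.2 > units
        · simp [stepB, h, hk, hv]
        · simp [stepB, h, hv]
      simp only [hT, hB]
      rw [ih tens ti _ hpw' (fun p hp => lt_trans hk (hkrest p hp))]
      set q := rest.foldl (stepT last) (tens, ti) with hq
      by_cases hti : q.2 = ti
      · -- the tens index never moves again: the head units step matches B's elif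
        have hhead : stepU q.2 units kv = (if kv.2 > units then kv.2 else units) := by
          by_cases hv : kv.2 > units
          · simp [stepU, hv, hti, hk]
          · simp [stepU, hv]
        simp only [if_pos hti, hhead]
      · -- the tens index moves to some index beyond kv.1: head units step is a no-op
        have hq2 : kv.1 < q.2 := by
          rcases stepT_snd last rest tens ti with h1 | ⟨p, hp, he⟩
          · rw [← hq] at h1; exact absurd h1 hti
          · rw [← hq] at he; have := hkrest p hp; omega
        have hhead : stepU q.2 0 kv = 0 := by
          simp only [stepU]; rw [if_neg]; rintro ⟨-, hgt⟩; omega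
        simp only [if_neg hti, hhead]

-- unfolding A's port to its two folds (definitional)
lemma A_eq (bank : List Int) :
    find_largest_two_digit_voltage_py bank =
      (let s := (PySem.List.pyRange 0 (PySem.List.len bank - 1) 1).foldl
          (fun (st : Int × Int) t =>
            if PySem.List.pyGetD bank t 0 > st.1 then (PySem.List.pyGetD bank t 0, t) else st)
          (0, 0)
       s.1 * 10 + (PySem.List.pyRange 0 (PySem.List.len bank) 1).foldl
          (fun units u =>
            if PySem.List.pyGetD bank u 0 > units ∧ u > s.2 then PySem.List.pyGetD bank u 0
            else units)
          0) := rfl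

-- unfolding B's port to a stepB fold (definitional)
lemma altB_eq (bank : List Int) :
    find_largest_two_digit_voltage_py_alt bank =
      ((PySem.List.enumerate bank 0).foldl (stepB (PySem.List.len bank - 1)) (0, 0, 0)).1 * 10 +
        ((PySem.List.enumerate bank 0).foldl (stepB (PySem.List.len bank - 1)) (0, 0, 0)).2.2 := rfl

-- A's loop1 (over range(n-1), unguarded) equals the guarded stepT fold over all of enumerate
lemma loop1_eq (bank : List Int) :
    (PySem.List.pyRange 0 (PySem.List.len bank - 1) 1).foldl
      (fun (st : Int × Int) t =>
        if PySem.List.pyGetD bank t 0 > st.1 then (PySem.List.pyGetD bank t 0, t) else st)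
      (0, 0) =
    (PySem.List.enumerate bank 0).foldl (stepT (PySem.List.len bank - 1)) (0, 0) := by
  rw [PySem.List.enumerate_eq_map_pyRange bank 0, List.foldl_map]
  rcases bank with _ | ⟨b, bs⟩
  · rfl
  · set n := PySem.List.len (b :: bs) with hn
    have hn1 : 1 ≤ n := by rw [hn]; simp [PySem.List.len]
    have hsing := PySem.List.pyRange_one_singleton (n - 1)
    rw [show n - 1 + 1 = n by ring] at hsing
    rw [show PySem.List.pyRange 0 n 1 =
          PySem.List.pyRange 0 (n - 1) 1 ++ PySem.List.pyRange (n - 1) n 1 from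
        PySem.List.pyRange_one_append 0 (n - 1) n (by omega) (by omega),
      hsing, List.foldl_append]
    simp only [List.foldl_cons, List.foldl_nil]
    have hnoop : ∀ st : Int × Int,
        stepT (n - 1) st (n - 1, PySem.List.pyGetD (b :: bs) (n - 1) 0) = st := by
      intro st; simp [stepT]
    rw [hnoop]
    apply PySem.List.foldl_congr_mem
    intro acc x hx
    have hxlt : x < n - 1 := (PySem.List.mem_pyRange_one.mp hx).2
    by_cases hv : PySem.List.pyGetD (b :: bs) x 0 > acc.1
    · simp [stepT, hv, hxlt]
    · simp [stepT, hv]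

-- A's loop2 is the stepU fold over enumerate
lemma loop2_eq (bank : List Int) (ti : Int) :
    (PySem.List.pyRange 0 (PySem.List.len bank) 1).foldl
      (fun units u =>
        if PySem.List.pyGetD bank u 0 > units ∧ u > ti then PySem.List.pyGetD bank u 0 else units)
      0 =
    (PySem.List.enumerate bank 0).foldl (stepU ti) 0 := by
  rw [PySem.List.enumerate_eq_map_pyRange bank 0, List.foldl_map]
  rfl

-- ===== VERDICT (by name: the statement is the Claim_ definition above) =====
theorem find_largest_two_digit_voltage_py_spec : Claim_equal_find_largest_two_digit_voltage_py := by
  intro bank _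
  unfold Spec_find_largest_two_digit_voltage_py
  rw [A_eq bank, altB_eq bank]
  simp only []
  rw [loop1_eq, loop2_eq]
  rcases bank with _ | ⟨b, bs⟩
  · rfl
  · set last := PySem.List.len (b :: bs) - 1 with hlast
    rw [PySem.List.enumerate_cons, show (0 : Int) + 1 = 1 from rfl]
    simp only [List.foldl_cons]
    have hti0 : (stepT last (0, 0) (0, b)).2 = 0 := by
      by_cases h : (0 : Int) < last ∧ b > 0 <;> simp [stepT, h]
    have hstep : stepB last (0, 0, 0) (0, b) =
        ((stepT last (0, 0) (0, b)).1, (stepT last (0, 0) (0, b)).2, 0) := by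
      by_cases h : (0 : Int) < last ∧ b > 0 <;> simp [stepB, stepT, h]
    have hpw : (PySem.List.enumerate bs 1).Pairwise (fun a b => a.1 < b.1) :=
      PySem.List.pairwise_lt_enumerate bs 1
    have hlb : ∀ kv ∈ PySem.List.enumerate bs 1, (stepT last (0, 0) (0, b)).2 < kv.1 := by
      intro kv hkv
      rcases (PySem.List.mem_enumerate_iff bs 1 kv).mp hkv with ⟨k, hk, he⟩
      rw [hti0, he]; omega
    rw [hstep, mainB last (PySem.List.enumerate bs 1) _ _ _ hpw hlb, Prod.mk.eta]
    set q := (PySem.List.enumerate bs 1).foldl (stepT last) (stepT last (0, 0) (0, b)) with hq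
    have hq2 : 0 ≤ q.2 := by
      rcases stepT_snd last (PySem.List.enumerate bs 1)
          (stepT last (0, 0) (0, b)).1 (stepT last (0, 0) (0, b)).2 with h1 | ⟨p, hp, he⟩
      · rw [hq, ← Prod.mk.eta (p := stepT last (0, 0) (0, b))]; omega
      · have := hlb p hp
        rw [hq, ← Prod.mk.eta (p := stepT last (0, 0) (0, b))]; omega
    have hhead : stepU q.2 0 (0, b) = 0 := by
      simp only [stepU]; rw [if_neg]; rintro ⟨-, hgt⟩; omega
    have hif : (if q.2 = (stepT last (0, 0) (0, b)).2 then (0 : Int) else 0) = 0 := by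
      split_ifs <;> rfl
    rw [hhead, hif]
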